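-- pv_equiv track=rewrite | github.com/adithya1012/LeetCode | min_max_logest_subarray.py | longest_valid_ctr_subarray
-- ===== SOURCE A (Python) =====
-- from collections import deque
--
-- def longest_valid_ctr_subarray(ctrs, t):
--     max_dq = deque()  # Stores indices of potential maximums
--     min_dq = deque()  # Stores indices of potential minimums
--     left = 0
--     max_len = 0
--
--     for right in range(len(ctrs)):
--         # Maintain monotonic deques
--         while max_dq and ctrs[max_dq[-1]] <= ctrs[right]:
--             max_dq.pop()
--         max_dq.append(right)
--
--         while min_dq and ctrs[min_dq[-1]] >= ctrs[right]:
--             min_dq.pop()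
--         min_dq.append(right)
--
--         # Shrink the window if the condition ctrs[max] - ctrs[min] > t is met
--         while ctrs[max_dq[0]] - ctrs[min_dq[0]] > t:
--             left += 1
--             if max_dq[0] < left:
--                 max_dq.popleft()
--             if min_dq[0] < left:
--                 min_dq.popleft()
--
--         max_len = max(max_len, right - left + 1)
--
--     return max_len
-- ===== SOURCE B (Python) =====
-- def longest_valid_ctr_subarray(ctrs, t):
--     # Same sliding window over `right`, but no monotonic deques: the shrink
--     # step recomputes the window's max and min directly from the slice.
--     max_len = 0
--     left = 0
--     for right in range(len(ctrs)):
--         while max(ctrs[left:right + 1]) - min(ctrs[left:right + 1]) > t: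
--             left += 1
--         max_len = max(max_len, right - left + 1)
--     return max_len
-- ===== Notes on version B (the rewrite author's own statement) =====
-- stated objective: simpler
-- what changed: B keeps the same sliding-window outer loop but drops A's two monotonic index deques entirely: the shrink step recomputes the window's max and min directly from the slice ctrs[left:right+1].
import Mathlib
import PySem

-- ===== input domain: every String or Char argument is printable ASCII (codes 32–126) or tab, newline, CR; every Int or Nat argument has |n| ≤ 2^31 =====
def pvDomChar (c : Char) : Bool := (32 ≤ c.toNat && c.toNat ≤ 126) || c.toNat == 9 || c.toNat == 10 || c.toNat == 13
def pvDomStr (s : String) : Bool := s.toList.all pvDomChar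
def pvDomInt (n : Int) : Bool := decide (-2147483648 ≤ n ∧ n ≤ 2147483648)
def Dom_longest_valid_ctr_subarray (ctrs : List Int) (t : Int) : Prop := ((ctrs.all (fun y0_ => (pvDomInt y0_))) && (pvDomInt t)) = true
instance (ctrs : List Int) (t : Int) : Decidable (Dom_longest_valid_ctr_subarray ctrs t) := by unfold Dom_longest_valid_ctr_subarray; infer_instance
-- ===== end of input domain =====

-- B replaces A's two monotonic index deques by recomputing the window's max/min from the
-- slice in the shrink step: simpler (no deque maintenance), same sliding-window outer loop.

-- ===== PORT A =====
-- 'while max_dq and ctrs[max_dq[-1]] <= ctrs[right]: max_dq.pop()'  (pop from the back)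
def popMaxA (ctrs : List Int) (v : Int) (dq : List Nat) : List Nat :=
  if h : dq = [] then dq
  else if ctrs.getD (dq.getLast h) 0 ≤ v then popMaxA ctrs v dq.dropLast else dq
termination_by dq.length
decreasing_by
  have : dq.length ≠ 0 := fun hn => h (List.eq_nil_of_length_eq_zero hn)
  simp [List.length_dropLast]; omega

-- 'while min_dq and ctrs[min_dq[-1]] >= ctrs[right]: min_dq.pop()'
def popMinA (ctrs : List Int) (v : Int) (dq : List Nat) : List Nat :=
  if h : dq = [] then dq
  else if v ≤ ctrs.getD (dq.getLast h) 0 then popMinA ctrs v dq.dropLast else dq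
termination_by dq.length
decreasing_by
  have : dq.length ≠ 0 := fun hn => h (List.eq_nil_of_length_eq_zero hn)
  simp [List.length_dropLast]; omega

-- 'while ctrs[max_dq[0]] - ctrs[min_dq[0]] > t: left += 1; …popleft…'
-- fuel only guards termination (right+2 always suffices when Python's loop exits;
-- on a raising run the result is junk — those inputs are outside Pre_)
def shrinkA (ctrs : List Int) (t : Int) : Nat → List Nat → List Nat → Nat → List Nat × List Nat × Nat
  | 0, maxdq, mindq, left => (maxdq, mindq, left)
  | fuel+1, maxdq, mindq, left =>
    if ctrs.getD (maxdq.headD 0) 0 - ctrs.getD (mindq.headD 0) 0 > t then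
      let left' := left + 1
      let maxdq' := if maxdq.headD 0 < left' then maxdq.tail else maxdq
      let mindq' := if mindq.headD 0 < left' then mindq.tail else mindq
      shrinkA ctrs t fuel maxdq' mindq' left'
    else (maxdq, mindq, left)

-- one iteration of 'for right in range(len(ctrs))'
def stepA (ctrs : List Int) (t : Int) (s : List Nat × List Nat × Nat × Nat) (right : Nat) :
    List Nat × List Nat × Nat × Nat :=
  let maxdq1 := popMaxA ctrs (ctrs.getD right 0) s.1 ++ [right]
  let mindq1 := popMinA ctrs (ctrs.getD right 0) s.2.1 ++ [right]
  let r := shrinkA ctrs t (right + 2) maxdq1 mindq1 s.2.2.1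
  (r.1, r.2.1, r.2.2, max s.2.2.2 (right + 1 - r.2.2))

def longest_valid_ctr_subarray (ctrs : List Int) (t : Int) : Int :=
  (((List.range ctrs.length).foldl (stepA ctrs t) ([], [], 0, 0)).2.2.2 : Nat)

-- ===== PORT B =====
-- Python's max(lst) / min(lst) (running extremum; [] raises in Python — junk 0, outside Pre_)
def pyMaxB : List Int → Int
  | [] => 0
  | x :: rest => rest.foldl (fun m v => if v > m then v else m) x

def pyMinB : List Int → Int
  | [] => 0
  | x :: rest => rest.foldl (fun m v => if v < m then v else m) x

-- 'while max(ctrs[left:right+1]) - min(ctrs[left:right+1]) > t: left += 1'  (fuel as in shrinkA)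
def shrinkB (ctrs : List Int) (t : Int) : Nat → Nat → Nat → Nat
  | 0, left, _ => left
  | fuel+1, left, right =>
    let w := PySem.List.slice ctrs (some (left : Int)) (some ((right : Int) + 1))
    if pyMaxB w - pyMinB w > t then shrinkB ctrs t fuel (left + 1) right else left

def stepB (ctrs : List Int) (t : Int) (s : Nat × Nat) (right : Nat) : Nat × Nat :=
  let left := shrinkB ctrs t (right + 2) s.1 right
  (left, max s.2 (right + 1 - left))

def longest_valid_ctr_subarray_alt (ctrs : List Int) (t : Int) : Int :=
  (((List.range ctrs.length).foldl (stepB ctrs t) (0, 0)).2 : Nat)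

-- ===== PRECONDITION & SPEC =====
-- Pre_ excludes exactly the inputs where A raises (IndexError): a nonempty list with t < 0,
-- where the shrink loop empties both deques. B raises there too (ValueError from max([])).
def Pre_longest_valid_ctr_subarray (ctrs : List Int) (t : Int) : Prop := ctrs = [] ∨ 0 ≤ t
instance (ctrs : List Int) (t : Int) : Decidable (Pre_longest_valid_ctr_subarray ctrs t) := by unfold Pre_longest_valid_ctr_subarray; infer_instance

def pvWitness_longest_valid_ctr_subarray : List Int × Int := ([1, 3, 2], 2)

def Spec_longest_valid_ctr_subarray (ctrs : List Int) (t : Int) (out : Int) : Prop := out = longest_valid_ctr_subarray_alt ctrs t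
instance (ctrs : List Int) (t : Int) (out : Int) : Decidable (Spec_longest_valid_ctr_subarray ctrs t out) := by unfold Spec_longest_valid_ctr_subarray; infer_instance

-- ===== CLAIM (what is proved, stated in full; the proofs are below) =====
def Claim_equal_longest_valid_ctr_subarray : Prop := ∀ (ctrs : List Int) (t : Int), Dom_longest_valid_ctr_subarray ctrs t → Pre_longest_valid_ctr_subarray ctrs t → Spec_longest_valid_ctr_subarray ctrs t (longest_valid_ctr_subarray ctrs t)

-- ===== LEMMAS AND PROOFS =====

-- i is a 'record' of window […, r]: strictly key-greater than every later element up to r.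
-- key = id gives A's max-deque entries, key = (-·) the min-deque entries.
def recP (key : Int → Int) (ctrs : List Int) (r i : Nat) : Bool :=
  (List.range' (i+1) (r - i)).all (fun j => key (ctrs.getD j 0) < key (ctrs.getD i 0))

-- the records of [l, r] in increasing index order = the exact content of A's deque
def recs (key : Int → Int) (ctrs : List Int) (l r : Nat) : List Nat :=
  (List.range' l (r + 1 - l)).filter (recP key ctrs r)

lemma range'_concat' (s n : Nat) : List.range' s (n+1) = List.range' s n ++ [s+n] := by
  have := List.range'_concat (s := s) (n := n) (step := 1); simpa using this

lemma recs_left_unfold (key : Int → Int) (ctrs : List Int) (l r : Nat) (hl : l ≤ r) :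
    recs key ctrs l r = (if recP key ctrs r l then [l] else []) ++ recs key ctrs (l+1) r := by
  unfold recs
  have h1 : r + 1 - l = (r - l) + 1 := by omega
  have h2 : r + 1 - (l + 1) = r - l := by omega
  rw [h1, h2, List.range'_succ, List.filter_cons]
  split <;> simp

lemma recP_self (key : Int → Int) (ctrs : List Int) (r : Nat) : recP key ctrs r r = true := by
  simp [recP]

lemma recs_head (key : Int → Int) (ctrs : List Int) (r : Nat) :
    ∀ l, l ≤ r → ∃ h rest, recs key ctrs l r = h :: rest ∧ l ≤ h ∧ h ≤ r ∧
      ∀ j, l ≤ j → j ≤ r → key (ctrs.getD j 0) ≤ key (ctrs.getD h 0) := by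
  have main : ∀ d l, r - l = d → l ≤ r → ∃ h rest, recs key ctrs l r = h :: rest ∧ l ≤ h ∧ h ≤ r ∧
      ∀ j, l ≤ j → j ≤ r → key (ctrs.getD j 0) ≤ key (ctrs.getD h 0) := by
    intro d
    induction d using Nat.strong_induction_on with
    | _ d IH =>
      intro l hd hl
      rw [recs_left_unfold key ctrs l r hl]
      by_cases hp : recP key ctrs r l = true
      · refine ⟨l, recs key ctrs (l+1) r, by rw [if_pos hp]; rfl, le_rfl, hl, ?_⟩
        intro j hj1 hj2
        rcases Nat.eq_or_lt_of_le hj1 with rfl | hlt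
        · exact le_rfl
        · have hmem : j ∈ List.range' (l+1) (r - l) := List.mem_range'_1.mpr (by omega)
          have := (List.all_eq_true.mp hp) j hmem
          exact le_of_lt (by simpa using this)
      · have hlr : l < r := by
          rcases Nat.eq_or_lt_of_le hl with rfl | h; · simp [recP] at hp
          · exact h
        obtain ⟨h, rest, heq, hh1, hh2, hmax⟩ := IH (r - (l+1)) (by omega) (l+1) rfl (by omega)
        refine ⟨h, rest, by rw [if_neg hp]; simpa using heq, by omega, hh2, ?_⟩
        intro j hj1 hj2
        rcases Nat.eq_or_lt_of_le hj1 with rfl | hlt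
        · unfold recP at hp
          rw [List.all_eq_true] at hp
          push Not at hp
          obtain ⟨j0, hj0m, hj0⟩ := hp
          have hj0b := List.mem_range'_1.mp hj0m
          have h1 : key (ctrs.getD l 0) ≤ key (ctrs.getD j0 0) :=
            not_lt.mp (by simpa using hj0)
          exact le_trans h1 (hmax j0 (by omega) (by omega))
        · exact hmax j hlt hj2
  exact fun l hl => main (r - l) l rfl hl

lemma recs_pairwise (key : Int → Int) (ctrs : List Int) (l r : Nat) :
    List.Pairwise (fun i j => key (ctrs.getD j 0) < key (ctrs.getD i 0)) (recs key ctrs l r) := by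
  have h1 : List.Pairwise (· < ·) (List.range' l (r + 1 - l)) := List.pairwise_lt_range' ..
  have h2 := h1.filter (recP key ctrs r)
  refine h2.imp_of_mem (fun {i j} hi hj hij => ?_)
  have hri := (List.mem_filter.mp hi).2
  have hji : j ∈ List.range' (l) (r + 1 - l) := (List.mem_filter.mp hj).1
  have hjb := List.mem_range'_1.mp hji
  have : j ∈ List.range' (i+1) (r - i) := List.mem_range'_1.mpr (by omega)
  have := (List.all_eq_true.mp hri) j this
  simpa using this

lemma popMaxA_eq_filter (ctrs : List Int) (v : Int) :
    ∀ dq : List Nat, List.Pairwise (fun i j => ctrs.getD j 0 < ctrs.getD i 0) dq →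
      popMaxA ctrs v dq = dq.filter (fun i => decide (v < ctrs.getD i 0)) := by
  have main : ∀ n (dq : List Nat), dq.length ≤ n →
      List.Pairwise (fun i j => ctrs.getD j 0 < ctrs.getD i 0) dq →
      popMaxA ctrs v dq = dq.filter (fun i => decide (v < ctrs.getD i 0)) := by
    intro n
    induction n with
    | zero =>
      intro dq hlen _
      have : dq = [] := List.eq_nil_of_length_eq_zero (by omega)
      subst this; rw [popMaxA]; simp
    | succ n IH =>
      intro dq hlen hp
      by_cases h : dq = []
      · subst h; rw [popMaxA]; simp
      · have hsplit : dq.dropLast ++ [dq.getLast h] = dq := List.dropLast_append_getLast h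
        by_cases hc : ctrs.getD (dq.getLast h) 0 ≤ v
        · rw [popMaxA, dif_neg h, if_pos hc]
          have hp' : List.Pairwise (fun i j => ctrs.getD j 0 < ctrs.getD i 0) dq.dropLast :=
            hp.sublist (List.dropLast_sublist dq)
          rw [IH dq.dropLast (by rw [List.length_dropLast]; omega) hp']
          conv_rhs => rw [← hsplit]
          rw [List.filter_append]
          have hfalse : (decide (v < ctrs.getD (dq.getLast h) 0)) = false := by
            simp only [decide_eq_false_iff_not]; exact not_lt.mpr hc
          rw [List.filter_singleton, hfalse]
          simp
        · rw [popMaxA, dif_neg h, if_neg hc]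
          refine (List.filter_eq_self.mpr ?_).symm
          intro i hi
          rw [← hsplit] at hp hi
          rcases List.mem_append.mp hi with hi' | hi'
          · have := (List.pairwise_append.mp hp).2.2 i hi' (dq.getLast h) (by simp)
            simp only [decide_eq_true_eq]
            omega
          · simp at hi'
            subst hi'
            simp only [decide_eq_true_eq]
            omega
  exact fun dq hp => main dq.length dq le_rfl hp

lemma popMinA_eq_filter (ctrs : List Int) (v : Int) :
    ∀ dq : List Nat, List.Pairwise (fun i j => ctrs.getD i 0 < ctrs.getD j 0) dq →
      popMinA ctrs v dq = dq.filter (fun i => decide (ctrs.getD i 0 < v)) := by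
  have main : ∀ n (dq : List Nat), dq.length ≤ n →
      List.Pairwise (fun i j => ctrs.getD i 0 < ctrs.getD j 0) dq →
      popMinA ctrs v dq = dq.filter (fun i => decide (ctrs.getD i 0 < v)) := by
    intro n
    induction n with
    | zero =>
      intro dq hlen _
      have : dq = [] := List.eq_nil_of_length_eq_zero (by omega)
      subst this; rw [popMinA]; simp
    | succ n IH =>
      intro dq hlen hp
      by_cases h : dq = []
      · subst h; rw [popMinA]; simp
      · have hsplit : dq.dropLast ++ [dq.getLast h] = dq := List.dropLast_append_getLast h
        by_cases hc : v ≤ ctrs.getD (dq.getLast h) 0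
        · rw [popMinA, dif_neg h, if_pos hc]
          have hp' : List.Pairwise (fun i j => ctrs.getD i 0 < ctrs.getD j 0) dq.dropLast :=
            hp.sublist (List.dropLast_sublist dq)
          rw [IH dq.dropLast (by rw [List.length_dropLast]; omega) hp']
          conv_rhs => rw [← hsplit]
          rw [List.filter_append]
          have hfalse : (decide (ctrs.getD (dq.getLast h) 0 < v)) = false := by
            simp only [decide_eq_false_iff_not]; exact not_lt.mpr hc
          rw [List.filter_singleton, hfalse]
          simp
        · rw [popMinA, dif_neg h, if_neg hc]
          refine (List.filter_eq_self.mpr ?_).symm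
          intro i hi
          rw [← hsplit] at hp hi
          rcases List.mem_append.mp hi with hi' | hi'
          · have := (List.pairwise_append.mp hp).2.2 i hi' (dq.getLast h) (by simp)
            simp only [decide_eq_true_eq]
            omega
          · simp at hi'
            subst hi'
            simp only [decide_eq_true_eq]
            omega
  exact fun dq hp => main dq.length dq le_rfl hp

lemma recs_push (key : Int → Int) (ctrs : List Int) (l r : Nat) (hl : l ≤ r + 1) :
    (recs key ctrs l r).filter (fun i => decide (key (ctrs.getD (r+1) 0) < key (ctrs.getD i 0))) ++ [r+1]
      = recs key ctrs l (r+1) := by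
  rcases Nat.eq_or_lt_of_le hl with rfl | hlr
  · unfold recs
    have h0 : r + 1 - (r+1) = 0 := by omega
    have h1 : r + 1 + 1 - (r+1) = 1 := by omega
    rw [h0, h1, List.range'_one]
    simp [recP_self]
  · have hlr' : l ≤ r := by omega
    unfold recs
    have h1 : r + 1 + 1 - l = (r + 1 - l) + 1 := by omega
    rw [h1, range'_concat']
    have h2 : l + (r + 1 - l) = r + 1 := by omega
    rw [h2, List.filter_append, List.filter_singleton, recP_self]
    simp only [cond_true]
    congr 1
    rw [List.filter_filter]
    refine List.filter_congr ?_
    intro i hi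
    have hib := List.mem_range'_1.mp hi
    have hsplit : r + 1 - i = (r - i) + 1 := by omega
    unfold recP
    rw [hsplit, range'_concat']
    have h3 : i + 1 + (r - i) = r + 1 := by omega
    rw [h3, List.all_append]
    simp [Bool.and_comm]

-- the window slice as a map of getD over the index range
lemma slice_window (ctrs : List Int) (l r : Nat) (hl : l ≤ r) (hr : r < ctrs.length) :
    PySem.List.slice ctrs (some (l : Int)) (some ((r : Int) + 1))
      = (List.range' l (r + 1 - l)).map (fun i => ctrs.getD i 0) := by
  have hcast : ((r : Int) + 1) = ((r + 1 : Nat) : Int) := by push_cast; ring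
  rw [hcast, PySem.List.slice_natCast]
  apply List.ext_getElem
  · simp; omega
  · intro k h1 h2
    simp only [List.getElem_take, List.getElem_drop, List.getElem_map, List.getElem_range']
    rw [List.getD_eq_getElem ctrs 0 (by simp at h2 ⊢; omega)]
    congr 1
    omega

lemma foldl_sel (key : Int → Int) (f : Int → Int → Int)
    (hf : ∀ m v, f m v = if key m < key v then v else m) :
    ∀ (xs : List Int) (a : Int), (xs.foldl f a = a ∨ xs.foldl f a ∈ xs) ∧
      key a ≤ key (xs.foldl f a) ∧ ∀ y ∈ xs, key y ≤ key (xs.foldl f a) := by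
  intro xs
  induction xs with
  | nil => intro a; simp
  | cons x xs IH =>
    intro a
    rw [List.foldl_cons]
    obtain ⟨hmem, hacc, hall⟩ := IH (f a x)
    have hfx : f a x = x ∨ f a x = a := by rw [hf]; split <;> simp
    have hax : key a ≤ key (f a x) := by rw [hf]; split <;> [exact le_of_lt (by assumption); exact le_rfl]
    have hxx : key x ≤ key (f a x) := by rw [hf]; split <;> [exact le_rfl; exact not_lt.mp (by assumption)]
    refine ⟨?_, le_trans hax hacc, ?_⟩
    · rcases hmem with h | h
      · rw [h]; rcases hfx with h' | h'
        · exact Or.inr (by simp [h'])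
        · exact Or.inl h'
      · exact Or.inr (List.mem_cons_of_mem _ h)
    · intro y hy
      rcases List.mem_cons.mp hy with rfl | hy'
      · exact le_trans hxx hacc
      · exact hall y hy'

-- value of B's max/min over the window = value at the head of the corresponding record list
lemma pyMaxB_window (ctrs : List Int) (l r h : Nat) (hl : l ≤ r) (hr : r < ctrs.length)
    (hh1 : l ≤ h) (hh2 : h ≤ r)
    (hmax : ∀ j, l ≤ j → j ≤ r → ctrs.getD j 0 ≤ ctrs.getD h 0) :
    pyMaxB (PySem.List.slice ctrs (some (l : Int)) (some ((r : Int) + 1))) = ctrs.getD h 0 := by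
  rw [slice_window ctrs l r hl hr]
  have hsucc : r + 1 - l = (r - l) + 1 := by omega
  rw [hsucc, List.range'_succ, List.map_cons]
  simp only [pyMaxB]
  obtain ⟨hmem, hacc, hall⟩ := foldl_sel id (fun m v => if v > m then v else m)
    (fun m v => by simp [id]) ((List.range' (l+1) (r - l)).map (fun i => ctrs.getD i 0)) (ctrs.getD l 0)
  set res := ((List.range' (l+1) (r - l)).map (fun i => ctrs.getD i 0)).foldl
    (fun m v => if v > m then v else m) (ctrs.getD l 0) with hres
  have hub : res ≤ ctrs.getD h 0 := by
    rcases hmem with h1 | h1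
    · rw [h1]; exact hmax l le_rfl hl
    · obtain ⟨i, hi, hieq⟩ := List.mem_map.mp h1
      have hib := List.mem_range'_1.mp hi
      rw [← hieq]; exact hmax i (by omega) (by omega)
  have hlb : ctrs.getD h 0 ≤ res := by
    rcases Nat.eq_or_lt_of_le hh1 with rfl | hlt
    · simpa using hacc
    · have : ctrs.getD h 0 ∈ (List.range' (l+1) (r - l)).map (fun i => ctrs.getD i 0) :=
        List.mem_map.mpr ⟨h, List.mem_range'_1.mpr (by omega), rfl⟩
      simpa using hall _ this
  omega

lemma pyMinB_window (ctrs : List Int) (l r h : Nat) (hl : l ≤ r) (hr : r < ctrs.length)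
    (hh1 : l ≤ h) (hh2 : h ≤ r)
    (hmin : ∀ j, l ≤ j → j ≤ r → ctrs.getD h 0 ≤ ctrs.getD j 0) :
    pyMinB (PySem.List.slice ctrs (some (l : Int)) (some ((r : Int) + 1))) = ctrs.getD h 0 := by
  rw [slice_window ctrs l r hl hr]
  have hsucc : r + 1 - l = (r - l) + 1 := by omega
  rw [hsucc, List.range'_succ, List.map_cons]
  simp only [pyMinB]
  obtain ⟨hmem, hacc, hall⟩ := foldl_sel (fun x => -x) (fun m v => if v < m then v else m)
    (fun m v => by
      dsimp only
      by_cases hvm : v < m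
      · rw [if_pos hvm, if_pos (by omega : -m < -v)]
      · rw [if_neg hvm, if_neg (by omega : ¬ (-m < -v))])
    ((List.range' (l+1) (r - l)).map (fun i => ctrs.getD i 0)) (ctrs.getD l 0)
  set res := ((List.range' (l+1) (r - l)).map (fun i => ctrs.getD i 0)).foldl
    (fun m v => if v < m then v else m) (ctrs.getD l 0) with hres
  have hub : ctrs.getD h 0 ≤ res := by
    rcases hmem with h1 | h1
    · rw [h1]; exact hmin l le_rfl hl
    · obtain ⟨i, hi, hieq⟩ := List.mem_map.mp h1
      have hib := List.mem_range'_1.mp hi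
      rw [← hieq]; exact hmin i (by omega) (by omega)
  have hlb : res ≤ ctrs.getD h 0 := by
    rcases Nat.eq_or_lt_of_le hh1 with rfl | hlt
    · omega
    · have hm : ctrs.getD h 0 ∈ (List.range' (l+1) (r - l)).map (fun i => ctrs.getD i 0) :=
        List.mem_map.mpr ⟨h, List.mem_range'_1.mpr (by omega), rfl⟩
      have := hall _ hm; omega
  omega

-- the two shrink loops advance left identically and keep the deques' record shape
lemma shrink_eq (ctrs : List Int) (t : Int) (ht : 0 ≤ t) (r : Nat) (hr : r < ctrs.length) :
    ∀ fuel l, l ≤ r → r - l < fuel →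
      ∃ l', l ≤ l' ∧ l' ≤ r ∧
        shrinkA ctrs t fuel (recs id ctrs l r) (recs (fun x => -x) ctrs l r) l
          = (recs id ctrs l' r, recs (fun x => -x) ctrs l' r, l') ∧
        shrinkB ctrs t fuel l r = l' := by
  intro fuel
  induction fuel with
  | zero => intro l _ hf; omega
  | succ fuel IH =>
    intro l hl hf
    obtain ⟨hmax, restmax, heqmax, hmb1, hmb2, hmaxall⟩ := recs_head id ctrs r l hl
    obtain ⟨hmin, restmin, heqmin, hnb1, hnb2, hminall⟩ := recs_head (fun x => -x) ctrs r l hl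
    have hmaxv : ∀ j, l ≤ j → j ≤ r → ctrs.getD j 0 ≤ ctrs.getD hmax 0 := by
      intro j h1 h2; simpa using hmaxall j h1 h2
    have hminv : ∀ j, l ≤ j → j ≤ r → ctrs.getD hmin 0 ≤ ctrs.getD j 0 := by
      intro j h1 h2; have := hminall j h1 h2; omega
    have hBmax := pyMaxB_window ctrs l r hmax hl hr hmb1 hmb2 hmaxv
    have hBmin := pyMinB_window ctrs l r hmin hl hr hnb1 hnb2 hminv
    rw [shrinkA, shrinkB, heqmax, heqmin]
    simp only [List.headD_cons, hBmax, hBmin]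
    by_cases hcond : ctrs.getD hmax 0 - ctrs.getD hmin 0 > t
    · -- window too wide: both sides advance left
      have hlr : l < r := by
        rcases Nat.eq_or_lt_of_le hl with rfl | h
        · have h1 : hmax = l := by omega
          have h2 : hmin = l := by omega
          rw [h1, h2] at hcond; omega
        · exact h
      rw [if_pos hcond, if_pos hcond]
      -- the popleft step keeps the record shape for window [l+1, r]
      have hstepmax : (if hmax < l + 1 then (hmax :: restmax).tail else hmax :: restmax) = recs id ctrs (l+1) r := by
        rw [recs_left_unfold id ctrs l r hl] at heqmax
        by_cases hp : recP id ctrs r l = true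
        · rw [if_pos hp, List.singleton_append] at heqmax
          injection heqmax with e1 e2
          rw [if_pos (by omega : hmax < l + 1)]
          simpa using e2.symm
        · rw [if_neg hp, List.nil_append] at heqmax
          obtain ⟨h', rest', heq', hb1', _, _⟩ := recs_head id ctrs r (l+1) (by omega)
          have e := heq'.symm.trans heqmax
          injection e with e1 e2
          rw [if_neg (by omega : ¬ hmax < l + 1)]
          exact heqmax.symm
      have hstepmin : (if hmin < l + 1 then (hmin :: restmin).tail else hmin :: restmin) = recs (fun x => -x) ctrs (l+1) r := by
        rw [recs_left_unfold (fun x => -x) ctrs l r hl] at heqmin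
        by_cases hp : recP (fun x => -x) ctrs r l = true
        · rw [if_pos hp, List.singleton_append] at heqmin
          injection heqmin with e1 e2
          rw [if_pos (by omega : hmin < l + 1)]
          simpa using e2.symm
        · rw [if_neg hp, List.nil_append] at heqmin
          obtain ⟨h', rest', heq', hb1', _, _⟩ := recs_head (fun x => -x) ctrs r (l+1) (by omega)
          have e := heq'.symm.trans heqmin
          injection e with e1 e2
          rw [if_neg (by omega : ¬ hmin < l + 1)]
          exact heqmin.symm
      obtain ⟨l', h1, h2, hA, hB⟩ := IH (l+1) (by omega) (by omega)
      refine ⟨l', by omega, h2, ?_, hB⟩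
      split_ifs with hc1 hc2 hc2
      · rw [if_pos hc1] at hstepmax; rw [if_pos hc2] at hstepmin
        rw [hstepmax, hstepmin]; exact hA
      · rw [if_pos hc1] at hstepmax; rw [if_neg hc2] at hstepmin
        rw [hstepmax, hstepmin]; exact hA
      · rw [if_neg hc1] at hstepmax; rw [if_pos hc2] at hstepmin
        rw [hstepmax, hstepmin]; exact hA
      · rw [if_neg hc1] at hstepmax; rw [if_neg hc2] at hstepmin
        rw [hstepmax, hstepmin]; exact hA
    · rw [if_neg hcond, if_neg hcond]
      exact ⟨l, le_rfl, hl, by rw [heqmax, heqmin], rfl⟩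

lemma popMaxA_nil (ctrs : List Int) (v : Int) : popMaxA ctrs v [] = [] := by
  unfold popMaxA; simp

lemma popMinA_nil (ctrs : List Int) (v : Int) : popMinA ctrs v [] = [] := by
  unfold popMinA; simp

lemma recs_zero (key : Int → Int) (ctrs : List Int) : recs key ctrs 0 0 = [0] := by
  unfold recs; rw [List.range'_one]; simp [recP_self]

lemma loop_inv (ctrs : List Int) (t : Int) (ht : 0 ≤ t) :
    ∀ k, k ≤ ctrs.length → 1 ≤ k →
      ∃ l m, l ≤ k - 1 ∧
        (List.range k).foldl (stepA ctrs t) ([], [], 0, 0)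
          = (recs id ctrs l (k-1), recs (fun x => -x) ctrs l (k-1), l, m) ∧
        (List.range k).foldl (stepB ctrs t) (0, 0) = (l, m) := by
  intro k
  induction k with
  | zero => intro _ h; omega
  | succ k IH =>
    intro hk _
    rcases Nat.eq_zero_or_pos k with rfl | hk1
    · -- first iteration: right = 0
      obtain ⟨l', hl1, hl2, hA0, hB0⟩ := shrink_eq ctrs t ht 0 (by omega) 2 0 le_rfl (by omega)
      have hl0 : l' = 0 := by omega
      subst hl0
      refine ⟨0, 1, le_rfl, ?_, ?_⟩
      · rw [List.range_one, List.foldl_cons, List.foldl_nil]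
        simp only [stepA]
        rw [popMaxA_nil, popMinA_nil, List.nil_append]
        rw [recs_zero id ctrs, recs_zero (fun x => -x) ctrs] at hA0
        simp only [Nat.zero_add]
        rw [hA0]
        simp [recs_zero]
      · rw [List.range_one, List.foldl_cons, List.foldl_nil]
        simp only [stepB]
        simp only [Nat.zero_add]
        rw [hB0]
        simp
    · -- later iterations: right = k ≥ 1
      obtain ⟨l, m, hlb, hA, hB⟩ := IH (by omega) hk1
      have hk' : k - 1 + 1 = k := by omega
      have hrk : k < ctrs.length := by omega
      -- push: the new deques are the record lists of [l, k]
      have pairA : List.Pairwise (fun i j => ctrs.getD j 0 < ctrs.getD i 0) (recs id ctrs l (k-1)) := by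
        have := recs_pairwise id ctrs l (k-1); simpa using this
      have pairB : List.Pairwise (fun i j => ctrs.getD i 0 < ctrs.getD j 0) (recs (fun x => -x) ctrs l (k-1)) := by
        have := recs_pairwise (fun x => -x) ctrs l (k-1)
        exact this.imp (by intro a b h; omega)
      have hmax1 : popMaxA ctrs (ctrs.getD k 0) (recs id ctrs l (k-1)) ++ [k] = recs id ctrs l k := by
        rw [popMaxA_eq_filter ctrs (ctrs.getD k 0) _ pairA]
        have hpush := recs_push id ctrs l (k-1) (by omega)
        rw [hk'] at hpush
        simpa using hpush
      have hmin1 : popMinA ctrs (ctrs.getD k 0) (recs (fun x => -x) ctrs l (k-1)) ++ [k] = recs (fun x => -x) ctrs l k := by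
        rw [popMinA_eq_filter ctrs (ctrs.getD k 0) _ pairB]
        have hpush := recs_push (fun x => -x) ctrs l (k-1) (by omega)
        rw [hk'] at hpush
        have hcg : (recs (fun x => -x) ctrs l (k-1)).filter (fun i => decide (ctrs.getD i 0 < ctrs.getD k 0))
            = (recs (fun x => -x) ctrs l (k-1)).filter (fun i => decide ((fun x => -x) (ctrs.getD k 0) < (fun x => -x) (ctrs.getD i 0))) := by
          refine List.filter_congr fun i _ => ?_
          rw [decide_eq_decide]
          dsimp only
          constructor <;> intro h <;> omega
        rw [hcg]
        exact hpush
      obtain ⟨l', hl1', hl2', hAeq, hBeq⟩ := shrink_eq ctrs t ht k hrk (k+2) l (by omega) (by omega)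
      refine ⟨l', max m (k + 1 - l'), by omega, ?_, ?_⟩
      · rw [List.range_succ, List.foldl_append, List.foldl_cons, List.foldl_nil, hA]
        simp only [stepA]
        rw [hmax1, hmin1, hAeq]
        simp
      · rw [List.range_succ, List.foldl_append, List.foldl_cons, List.foldl_nil, hB]
        simp only [stepB]
        rw [hBeq]

-- ===== VERDICT (by name: the statement is the Claim_ definition above) =====
theorem longest_valid_ctr_subarray_spec : Claim_equal_longest_valid_ctr_subarray := by
  intro ctrs t _ hpre
  unfold Spec_longest_valid_ctr_subarray
  rcases hpre with hnil | ht
  · subst hnil; rfl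
  · rcases Nat.eq_zero_or_pos ctrs.length with h0 | hpos
    · simp [longest_valid_ctr_subarray, longest_valid_ctr_subarray_alt, h0]
    · obtain ⟨l, m, _, hA, hB⟩ := loop_inv ctrs t ht ctrs.length le_rfl hpos
      simp [longest_valid_ctr_subarray, longest_valid_ctr_subarray_alt, hA, hB]
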